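-- pv_equiv track=rewrite | github.com/ankitshah009/leetcode_python | graphs/1170-compare_strings_by_frequency_of_smallest_char.py | numSmallerByFrequency
-- ===== SOURCE A (Python) =====
-- from typing import List
--
-- def numSmallerByFrequency(queries: List[str], words: List[str]) -> List[int]:
--     """Simple but less efficient approach"""
--     def f(s):
--         min_char = min(s)
--         return s.count(min_char)
--
--     word_freqs = [f(w) for w in words]
--
--     result = []
--     for q in queries:
--         query_freq = f(q)
--         count = sum(1 for wf in word_freqs if query_freq < wf)
--         result.append(count)
--
--     return result
-- ===== SOURCE B (Python) =====
-- from typing import List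
--
-- def numSmallerByFrequency(queries: List[str], words: List[str]) -> List[int]:
--     """Sort word frequencies once, then answer each query by binary search."""
--     def f(s):
--         m = min(s)
--         return s.count(m)
--
--     def bisect_right(a, x):
--         # standard bisect.bisect_right loop (bisect module not imported by A)
--         lo, hi = 0, len(a)
--         while lo < hi:
--             mid = (lo + hi) // 2
--             if x < a[mid]:
--                 hi = mid
--             else:
--                 lo = mid + 1
--         return lo
--
--     freqs = sorted(f(w) for w in words)
--     n = len(freqs)
--     return [n - bisect_right(freqs, f(q)) for q in queries]
-- ===== Notes on version B (the rewrite author's own statement) =====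
-- stated objective: faster
-- what changed: Instead of rescanning all word frequencies for every query, B sorts the word frequencies once and answers each query with a binary search (hand-written bisect_right loop, since A imports no bisect), returning n minus the insertion point.
import Mathlib
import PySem

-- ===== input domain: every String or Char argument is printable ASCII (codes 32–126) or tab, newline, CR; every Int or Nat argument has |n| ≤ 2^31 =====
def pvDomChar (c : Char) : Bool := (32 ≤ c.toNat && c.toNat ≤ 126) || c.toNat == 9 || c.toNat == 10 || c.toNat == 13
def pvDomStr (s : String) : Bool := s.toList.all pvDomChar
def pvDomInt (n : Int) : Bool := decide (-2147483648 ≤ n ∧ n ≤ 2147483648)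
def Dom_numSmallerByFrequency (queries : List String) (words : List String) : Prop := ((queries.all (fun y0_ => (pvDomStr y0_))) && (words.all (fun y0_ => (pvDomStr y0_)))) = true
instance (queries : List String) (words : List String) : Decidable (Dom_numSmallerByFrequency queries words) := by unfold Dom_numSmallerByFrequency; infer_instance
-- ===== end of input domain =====

-- B sorts the word frequencies once and answers each query by binary search instead of A's per-query scan (objective: faster, asymptotic).

-- ===== PORT A =====
-- helper f(s): min_char = min(s); return s.count(min_char).  min('') raises ValueError (excluded by Pre_); 0 is a junk default there.
def pvFreqA (s : String) : Int :=
  match PySem.List.min? s.toList (fun c => c) with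
  | some m => (PySem.List.count s.toList m : Int)
  | none => 0

def numSmallerByFrequency (queries : List String) (words : List String) : List Int :=
  let wordFreqs := words.map pvFreqA
  queries.foldl (fun result q =>
    let queryFreq := pvFreqA q
    let count := wordFreqs.foldl (fun acc wf => if queryFreq < wf then acc + 1 else acc) (0 : Int)
    result ++ [count]) []

-- ===== PORT B =====
-- same helper f(s) as in Source B
def pvFreqB (s : String) : Int :=
  match PySem.List.min? s.toList (fun c => c) with
  | some m => (PySem.List.count s.toList m : Int)
  | none => 0

-- Source B's hand-written bisect_right is exactly Python's bisect.bisect_right loop = PySem.List.bisectRight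
def numSmallerByFrequency_alt (queries : List String) (words : List String) : List Int :=
  let freqs := PySem.List.sorted (words.map pvFreqB) (fun x => x) false
  let n := freqs.length
  queries.map (fun q => (n : Int) - (PySem.List.bisectRight freqs (pvFreqB q) : Int))

-- ===== PRECONDITION & SPEC =====
-- Pre_ excludes exactly the inputs where Python's min('') raises ValueError: every string must be nonempty.
def Pre_numSmallerByFrequency (queries : List String) (words : List String) : Prop :=
  (∀ q ∈ queries, q ≠ "") ∧ (∀ w ∈ words, w ≠ "")
instance (queries : List String) (words : List String) : Decidable (Pre_numSmallerByFrequency queries words) := by unfold Pre_numSmallerByFrequency; infer_instance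
def pvWitness_numSmallerByFrequency : List String × List String := (["cbd", "aA!"], ["zaaaz", "bbb", "q"])

def Spec_numSmallerByFrequency (queries : List String) (words : List String) (out : List Int) : Prop := out = numSmallerByFrequency_alt queries words
instance (queries : List String) (words : List String) (out : List Int) : Decidable (Spec_numSmallerByFrequency queries words out) := by unfold Spec_numSmallerByFrequency; infer_instance

-- ===== CLAIM (what is proved, stated in full; the proofs are below) =====
def Claim_equal_numSmallerByFrequency : Prop := ∀ (queries : List String) (words : List String), Dom_numSmallerByFrequency queries words → Pre_numSmallerByFrequency queries words → Spec_numSmallerByFrequency queries words (numSmallerByFrequency queries words)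

-- ===== LEMMAS AND PROOFS =====

-- A's inner 'sum(1 for wf in L if q < wf)' loop is a countP
lemma foldl_if_count (L : List Int) (q : Int) (a : Int) :
    L.foldl (fun acc wf => if q < wf then acc + 1 else acc) a = a + (L.countP (fun wf => decide (q < wf)) : Int) := by
  induction L generalizing a with
  | nil => simp
  | cons x t ih =>
    simp only [List.foldl_cons, List.countP_cons, ih]
    by_cases h : q < x
    · simp [h]; ring
    · simp [h]

-- On a sorted list, n - bisect_right q counts the elements strictly greater than q
lemma countP_gt_eq_sub_bisect (S : List Int) (q : Int) (hs : S.Pairwise (fun a b => a ≤ b)) :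
    (S.countP (fun wf => decide (q < wf)) : Int) = (S.length : Int) - (PySem.List.bisectRight S q : Int) := by
  obtain ⟨hle, hlt, hgt⟩ := PySem.List.bisectRight_spec S q hs
  set r := PySem.List.bisectRight S q with hr
  have hsplit : S = S.take r ++ S.drop r := (List.take_append_drop r S).symm
  have h1 : (S.take r).countP (fun wf => decide (q < wf)) = 0 := by
    rw [List.countP_eq_zero]
    intro x hx
    obtain ⟨i, hi, hxi⟩ := List.mem_iff_getElem.mp hx
    have hlen : i < r ∧ i < S.length := by simp [List.length_take] at hi; omega
    have := hlt i hlen.2 hlen.1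
    simp [List.getElem_take] at hxi
    simp [← hxi]
    omega
  have h2 : (S.drop r).countP (fun wf => decide (q < wf)) = (S.drop r).length := by
    rw [List.countP_eq_length]
    intro x hx
    obtain ⟨i, hi, hxi⟩ := List.mem_iff_getElem.mp hx
    have hi' : r + i < S.length := by simp [List.length_drop] at hi; omega
    have := hgt (r + i) hi' (Nat.le_add_right r i)
    simp [List.getElem_drop] at hxi
    simp [← hxi]
    omega
  calc (S.countP (fun wf => decide (q < wf)) : Int)
      = (((S.take r ++ S.drop r).countP (fun wf => decide (q < wf)) : Nat) : Int) := by rw [← hsplit]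
    _ = (S.length : Int) - (r : Int) := by
        rw [List.countP_append, h1, h2]
        simp [List.length_drop]
        omega

-- per-query agreement of the two computations (unconditional in Lean: both ports share the total freq helper)
lemma per_query (words : List String) (q : String) :
    (words.map pvFreqA).foldl (fun acc wf => if pvFreqA q < wf then acc + 1 else acc) (0 : Int) =
      ((PySem.List.sorted (words.map pvFreqB) (fun x => x) false).length : Int) -
        (PySem.List.bisectRight (PySem.List.sorted (words.map pvFreqB) (fun x => x) false) (pvFreqB q) : Int) := by
  have hAB : pvFreqA = pvFreqB := rfl
  set S := PySem.List.sorted (words.map pvFreqB) (fun x => x) false with hS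
  have hperm : S.Perm (words.map pvFreqB) := PySem.List.sorted_perm _ _ _
  have hpair : S.Pairwise (fun a b => a ≤ b) := PySem.List.sorted_pairwise _ _
  rw [hAB, foldl_if_count]
  have hc : (words.map pvFreqB).countP (fun wf => decide (pvFreqB q < wf)) =
      S.countP (fun wf => decide (pvFreqB q < wf)) := (hperm.countP_eq _).symm
  rw [hc]
  rw [countP_gt_eq_sub_bisect S (pvFreqB q) hpair]
  ring

-- ===== VERDICT (by name: the statement is the Claim_ definition above) =====
theorem numSmallerByFrequency_spec : Claim_equal_numSmallerByFrequency := by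
  intro queries words _ _
  unfold Spec_numSmallerByFrequency numSmallerByFrequency numSmallerByFrequency_alt
  rw [PySem.List.foldl_append_singleton_eq_map]
  exact List.map_congr_left (fun q _ => per_query words q)
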